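-- pv_equiv track=rewrite | github.com/szaidman22/PY110 | lesson_3/tic_tac_toe.py | move_coordinates
-- ===== SOURCE A (Python) =====
-- def move_coordinates(string):
--     """Returns the alphabetical column and numeric row from a valid input string"""
--     column = ''
--     row = ''
--     for character in string.casefold():
--         if character.isalpha():
--             column = character
--         if character.isnumeric():
--             row = character
--     return column, row
-- ===== SOURCE B (Python) =====
-- def move_coordinates(string):
--     """Returns the alphabetical column and numeric row from a valid input string"""
--     column = ''
--     row = ''
--     for character in reversed(string.casefold()):
--         if not column and character.isalpha():
--             column = character
--         if not row and character.isnumeric():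
--             row = character
--         if column and row:
--             break
--     return column, row
-- ===== Notes on version B (the rewrite author's own statement) =====
-- stated objective: alternative
-- what changed: B scans the casefolded string back-to-front, keeping the FIRST alpha/digit it meets (only filling still-empty slots) and breaking as soon as both are found, instead of A's full forward pass that overwrites the slots on every match.
import Mathlib
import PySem

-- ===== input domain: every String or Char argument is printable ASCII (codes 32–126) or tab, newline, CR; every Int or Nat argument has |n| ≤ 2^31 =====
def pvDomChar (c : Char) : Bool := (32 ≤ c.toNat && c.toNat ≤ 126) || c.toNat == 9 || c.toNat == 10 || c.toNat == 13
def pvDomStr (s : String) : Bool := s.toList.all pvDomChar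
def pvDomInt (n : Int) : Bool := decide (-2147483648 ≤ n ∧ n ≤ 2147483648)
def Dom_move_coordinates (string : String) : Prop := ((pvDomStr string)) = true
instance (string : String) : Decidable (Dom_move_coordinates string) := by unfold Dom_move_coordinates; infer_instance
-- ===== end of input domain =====

-- B replaces A's full forward overwrite-on-every-match pass by a back-to-front
-- scan that fills each still-empty slot once and stops as soon as both are found
-- (objective: alternative; same asymptotic cost).

-- ===== PORT A =====
-- forward pass; string state kept as List Char ('' = []); casefold = lower on the ASCII domain
def move_coordinates (string : String) : String × String :=
  let st := (PySem.Chars.lower string.toList).foldl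
    (fun (st : List Char × List Char) c =>
      (if PySem.Chars.isalpha c then [c] else st.1,
       if PySem.Chars.isdigit c then [c] else st.2)) ([], [])
  (String.ofList st.1, String.ofList st.2)

-- ===== PORT B =====
-- reverse scan with early exit once both column and row are found
def mcScan : List Char → List Char → List Char → List Char × List Char
  | [], col, row => (col, row)
  | c :: rest, col, row =>
    let col' := if col.isEmpty && PySem.Chars.isalpha c then [c] else col
    let row' := if row.isEmpty && PySem.Chars.isdigit c then [c] else row
    if !col'.isEmpty && !row'.isEmpty then (col', row')
    else mcScan rest col' row'

def move_coordinates_alt (string : String) : String × String :=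
  let st := mcScan (PySem.Chars.lower string.toList).reverse [] []
  (String.ofList st.1, String.ofList st.2)

-- ===== PRECONDITION & SPEC =====
def Spec_move_coordinates (string : String) (out : String × String) : Prop := out = move_coordinates_alt string
instance (string : String) (out : String × String) : Decidable (Spec_move_coordinates string out) := by unfold Spec_move_coordinates; infer_instance

-- ===== CLAIM (what is proved, stated in full; the proofs are below) =====
def Claim_equal_move_coordinates : Prop := ∀ (string : String), Dom_move_coordinates string → Spec_move_coordinates string (move_coordinates string)

-- ===== LEMMAS AND PROOFS =====

-- A's fold, abbreviated for the lemmas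
def mcFold (l : List Char) : List Char × List Char :=
  l.foldl (fun (st : List Char × List Char) c =>
    (if PySem.Chars.isalpha c then [c] else st.1,
     if PySem.Chars.isdigit c then [c] else st.2)) ([], [])

def mcCombine (x y : List Char) : List Char := if x.isEmpty then y else x

theorem mcScan_reverse_eq (l : List Char) : ∀ (col row : List Char),
    mcScan l.reverse col row = (mcCombine col (mcFold l).1, mcCombine row (mcFold l).2) := by
  induction l using List.reverseRecOn with
  | nil =>
    intro col row
    cases col <;> cases row <;> simp [mcScan, mcFold, mcCombine]
  | append_singleton l c ih =>
    intro col row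
    rw [List.reverse_append]
    simp only [List.reverse_singleton, List.singleton_append, mcScan]
    have hfold : mcFold (l ++ [c]) =
        (if PySem.Chars.isalpha c then [c] else (mcFold l).1,
         if PySem.Chars.isdigit c then [c] else (mcFold l).2) := by
      simp [mcFold, List.foldl_append]
    rw [hfold]
    by_cases hc : col.isEmpty <;> by_cases hr : row.isEmpty <;>
      by_cases ha : PySem.Chars.isalpha c <;> by_cases hd : PySem.Chars.isdigit c <;>
      simp_all [mcCombine, List.isEmpty_iff]

-- ===== VERDICT (by name: the statement is the Claim_ definition above) =====
theorem move_coordinates_spec : Claim_equal_move_coordinates := by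
  intro s _
  unfold Spec_move_coordinates move_coordinates move_coordinates_alt
  rw [mcScan_reverse_eq]
  simp [mcCombine, mcFold]
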